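-- pv_equiv track=rewrite | github.com/AI-Agent-Hub/agent_utils | src/fetch_ai_agent.py | get_best_item_json
-- ===== SOURCE A (Python) =====
-- def get_best_item_json(item_json_list):
--     """
--         domain same item, choose the ones with top content
--     """
--     item_list_meta_empty = []
--     item_list_meta_full = []
--     for item_json in item_json_list:
--         category = item_json["category"] if "category" in item_json else ""
--         content = item_json["content"] if "content" in item_json else ""
--         if content == "":
--             item_list_meta_empty.append(item_json)
--         else:
--             item_list_meta_full.append(item_json)
--
--     item_list_sorted = []
--     item_list_sorted.extend(item_list_meta_full)
--     item_list_sorted.extend(item_list_meta_empty)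
--
--     item_json_top = item_list_sorted[0] if len(item_list_sorted) > 0 else None
--     return item_json_top
-- ===== SOURCE B (Python) =====
-- def get_best_item_json(item_json_list):
--     """Single pass: remember the first item and the first item with nonempty content."""
--     first_any = None
--     first_full = None
--     for item in item_json_list:
--         if first_any is None:
--             first_any = item
--         if item.get("content", "") != "":
--             first_full = item
--             break
--     return first_full if first_full is not None else first_any
-- ===== Notes on version B (the rewrite author's own statement) =====
-- stated objective: simpler
-- what changed: Replaces the two accumulated partition lists plus concatenation and indexing by a single early-exiting pass that keeps only the first item and the first item with nonempty content.
import Mathlib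
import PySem

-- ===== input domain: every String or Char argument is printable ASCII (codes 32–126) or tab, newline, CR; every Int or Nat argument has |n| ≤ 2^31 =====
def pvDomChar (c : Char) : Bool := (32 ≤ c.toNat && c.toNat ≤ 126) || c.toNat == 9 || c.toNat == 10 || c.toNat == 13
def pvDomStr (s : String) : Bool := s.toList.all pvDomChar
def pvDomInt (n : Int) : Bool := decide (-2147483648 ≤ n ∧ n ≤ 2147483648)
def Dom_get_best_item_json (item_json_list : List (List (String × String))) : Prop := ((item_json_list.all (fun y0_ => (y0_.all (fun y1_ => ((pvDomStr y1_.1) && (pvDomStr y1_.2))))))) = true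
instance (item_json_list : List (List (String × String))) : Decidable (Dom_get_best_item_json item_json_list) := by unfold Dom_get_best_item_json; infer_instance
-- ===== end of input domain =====

-- B does one early-exiting pass keeping the first item and the first item with nonempty
-- content, instead of A's two accumulated partition lists, concatenation and indexing.

-- shared helper: first-match lookup in an association-list dict (Python d[k] / 'k in d')
def pvLookup? (d : List (String × String)) (k : String) : Option String :=
  (d.find? (fun p => p.1 == k)).map (·.2)

-- ===== PORT A =====
def get_best_item_json (item_json_list : List (List (String × String))) : Option (List (String × String)) :=
  let acc := item_json_list.foldl
    (fun (acc : List (List (String × String)) × List (List (String × String))) item_json =>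
      let _category := match pvLookup? item_json "category" with | some v => v | none => ""
      let content := match pvLookup? item_json "content" with | some v => v | none => ""
      if content == "" then (acc.1 ++ [item_json], acc.2)
      else (acc.1, acc.2 ++ [item_json]))
    ([], [])
  let item_list_sorted := acc.2 ++ acc.1
  if item_list_sorted.length > 0 then item_list_sorted[0]? else none

-- ===== PORT B =====
def getBestGo (xs : List (List (String × String))) (first_any : Option (List (String × String))) :
    Option (List (String × String)) :=
  match xs with
  | [] => first_any
  | item :: rest =>
    let first_any' := if first_any.isNone then some item else first_any
    if ((pvLookup? item "content").getD "") != "" then some item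
    else getBestGo rest first_any'

def get_best_item_json_alt (item_json_list : List (List (String × String))) : Option (List (String × String)) :=
  getBestGo item_json_list none

-- ===== PRECONDITION & SPEC =====
def Spec_get_best_item_json (item_json_list : List (List (String × String))) (out : Option (List (String × String))) : Prop := out = get_best_item_json_alt item_json_list
instance (item_json_list : List (List (String × String))) (out : Option (List (String × String))) : Decidable (Spec_get_best_item_json item_json_list out) := by unfold Spec_get_best_item_json; infer_instance

-- ===== CLAIM (what is proved, stated in full; the proofs are below) =====
def Claim_equal_get_best_item_json : Prop := ∀ (item_json_list : List (List (String × String))), Dom_get_best_item_json item_json_list → Spec_get_best_item_json item_json_list (get_best_item_json item_json_list)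

-- ===== LEMMAS AND PROOFS =====

def pvFull (item : List (String × String)) : Bool :=
  !((pvLookup? item "content").getD "" == "")

theorem getBestGo_eq (xs : List (List (String × String))) (fa : Option (List (String × String))) :
    getBestGo xs fa = ((xs.filter pvFull).head?).or (fa.or xs.head?) := by
  induction xs generalizing fa with
  | nil => cases fa <;> simp [getBestGo]
  | cons x rest ih =>
    simp only [getBestGo, List.filter_cons]
    by_cases hx : pvFull x
    · have : ((pvLookup? x "content").getD "" != "") = true := by
        simpa [pvFull] using hx
      simp [this, hx]
    · have : ((pvLookup? x "content").getD "" != "") = false := by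
        simpa [pvFull] using hx
      simp only [this, Bool.false_eq_true, if_false, hx, ih]
      cases fa <;> simp [Option.isNone]

theorem foldA_eq (xs : List (List (String × String)))
    (e f : List (List (String × String))) :
    xs.foldl
      (fun (acc : List (List (String × String)) × List (List (String × String))) item_json =>
        let _category := match pvLookup? item_json "category" with | some v => v | none => ""
        let content := match pvLookup? item_json "content" with | some v => v | none => ""
        if content == "" then (acc.1 ++ [item_json], acc.2)
        else (acc.1, acc.2 ++ [item_json]))
      (e, f)
    = (e ++ xs.filter (fun x => !pvFull x), f ++ xs.filter pvFull) := by
  induction xs generalizing e f with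
  | nil => simp
  | cons x rest ih =>
    have hc : (match pvLookup? x "content" with | some v => v | none => "") =
        (pvLookup? x "content").getD "" := by cases pvLookup? x "content" <;> rfl
    by_cases hx : pvFull x
    · have h1 : ((pvLookup? x "content").getD "" == "") = false := by
        simpa [pvFull] using hx
      simp only [List.foldl_cons, hc, h1, Bool.false_eq_true, if_false]
      rw [ih]
      simp [hx, List.append_assoc]
    · have h1 : ((pvLookup? x "content").getD "" == "") = true := by
        simpa [pvFull] using hx
      simp only [List.foldl_cons, hc, h1, if_true]
      rw [ih]
      simp [hx, List.append_assoc]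

theorem head?_filter_or (xs : List (List (String × String))) :
    ((xs.filter pvFull).head?).or ((xs.filter (fun x => !pvFull x)).head?)
      = ((xs.filter pvFull).head?).or xs.head? := by
  induction xs with
  | nil => rfl
  | cons x rest ih =>
    by_cases hx : pvFull x
    · simp [hx]
    · simp only [List.filter_cons, hx, Bool.false_eq_true, if_false, Bool.not_false, if_true]
      cases hr : (rest.filter pvFull).head? with
      | some y => simp
      | none => simp

theorem idx0_eq_head? (l : List (List (String × String))) :
    (if l.length > 0 then l[0]? else none) = l.head? := by
  cases l <;> simp

-- ===== VERDICT (by name: the statement is the Claim_ definition above) =====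
theorem get_best_item_json_spec : Claim_equal_get_best_item_json := by
  intro xs _
  unfold Spec_get_best_item_json get_best_item_json get_best_item_json_alt
  rw [foldA_eq, getBestGo_eq]
  simp only [List.nil_append]
  rcases hf : xs.filter pvFull with _ | ⟨y, ys⟩
  · have h := head?_filter_or xs
    rw [hf] at h
    simp only [List.head?_nil, Option.none_or] at h
    simp only [List.nil_append, idx0_eq_head?, h, List.head?_nil, Option.none_or]
  · simp
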